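-- pv_equiv track=rewrite | github.com/pypi-data/pypi-mirror-344 | packages/otauto/otauto-0.7.6-py3-none-any.whl/game_control/task_logic.py | handle_dict_values
-- ===== SOURCE A (Python) =====
-- def handle_dict_values(dic: dict, diff: int = 5, tag: int = 30):
--     """
--     合并值[1],值[-1]相同的键值对
--     :param dic: 字典
--     :param diff: 差值 识别出来的文字y轴差值
--     :param tag: 标记 文字识别的类型,数字1~999
--     :return: 合并后的字典
--     """
--     # 筛选出[-1]等于tag的字典项
--     filtered_dic = {key: value for key, value in dic.items() if value[-1] == tag}
--
--     similar_pairs = []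
--     items = list(filtered_dic.items())
--
--     # 遍历所有的键值对,寻找相似的键值对
--     for i in range(len(items)):
--         current_key, current_value = items[i]
--         for j in range(i + 1, len(items)):
--             next_key, next_value = items[j]
--             # 检查条件: 第二个值的误差小于diff, 且最后一个值相同
--             if abs(next_value[1] - current_value[1]) < diff:
--                 similar_pairs.append((current_key, next_key))
--
--     merged_dic = {}
--     merged_keys = set()  # 用于跟踪已经合并的键
--
--     # 合并相似的键
--     for key1, key2 in similar_pairs:
--         if key1 in merged_keys or key2 in merged_keys:
--             continue  # 如果其中一个键已经被合并,则跳过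
--
--         # 获取两个键的值
--         value1 = filtered_dic[key1]
--         value2 = filtered_dic[key2]
--
--         # 取两个值的最小值
--         merged_value = tuple(min(v1, v2) for v1, v2 in zip(value1, value2))
--
--         # 生成合并后的键
--         merged_key = f"{key1}_{key2}"  # 合并键时加上下划线
--
--         # 添加到新的字典中
--         merged_dic[merged_key] = merged_value
--
--         # 标记这两个键为已合并
--         merged_keys.update([key1, key2])
--
--     # 将未合并的键添加到新的字典中
--     unmerged_items = {key: value for key, value in filtered_dic.items() if key not in merged_keys}
--     merged_dic.update(unmerged_items)
--
--     # 按照第一个元素从小到大排序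
--     merged_dic = dict(sorted(merged_dic.items(), key=lambda item: item[1][0]))
--
--     return merged_dic
-- ===== SOURCE B (Python) =====
-- def handle_dict_values(dic: dict, diff: int = 5, tag: int = 30):
--     # Single forward pass: merge each still-unused item with the first later
--     # still-unused item whose y-coordinate is within diff, instead of
--     # materialising the full quadratic pair list and greedily replaying it.
--     items = [(k, v) for k, v in dic.items() if v[-1] == tag]
--     used = set()
--     merged = {}
--     for i, (k1, v1) in enumerate(items):
--         if k1 in used:
--             continue
--         for j in range(i + 1, len(items)):
--             k2, v2 = items[j]
--             if k2 in used or not abs(v2[1] - v1[1]) < diff: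
--                 continue
--             merged[f"{k1}_{k2}"] = tuple(min(a, b) for a, b in zip(v1, v2))
--             used.add(k1)
--             used.add(k2)
--             break
--     for k, v in items:
--         if k not in used:
--             merged[k] = v
--     return dict(sorted(merged.items(), key=lambda item: item[1][0]))
-- ===== Notes on version B (the rewrite author's own statement) =====
-- stated objective: alternative
-- what changed: B drops the similar_pairs list and the greedy replay over it: one fused forward pass merges each still-unused item with the first later still-unused item whose y-coordinate is within diff (break), leaving unmerged items as-is; this reproduces A's greedy choices because A consumes pairs in (i,j) lexicographic order with each key used at most once.
import Mathlib
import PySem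

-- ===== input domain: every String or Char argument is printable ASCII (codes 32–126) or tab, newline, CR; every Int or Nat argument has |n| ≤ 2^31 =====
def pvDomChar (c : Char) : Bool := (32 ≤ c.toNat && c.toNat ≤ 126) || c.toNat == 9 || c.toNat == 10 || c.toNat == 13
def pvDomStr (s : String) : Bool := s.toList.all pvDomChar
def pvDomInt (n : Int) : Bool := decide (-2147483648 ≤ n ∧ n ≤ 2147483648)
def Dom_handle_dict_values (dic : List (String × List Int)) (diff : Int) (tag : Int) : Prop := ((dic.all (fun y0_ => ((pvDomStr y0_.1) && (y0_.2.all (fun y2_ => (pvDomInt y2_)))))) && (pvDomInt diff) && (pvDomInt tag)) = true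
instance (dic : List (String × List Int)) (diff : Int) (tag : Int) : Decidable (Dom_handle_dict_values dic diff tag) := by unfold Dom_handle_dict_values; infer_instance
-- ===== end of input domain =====

-- B merges in one fused forward pass (first later unused partner, break) instead of
-- materialising A's quadratic similar_pairs list and greedily replaying it; return value only.

-- ===== PORT A =====
-- similar_pairs: for i, for j > i, append (key_i, key_j) when |y_j - y_i| < diff
def pvPairsA (diff : Int) : List (String × List Int) → List (String × String)
  | [] => []
  | (k, v) :: rest =>
      (rest.filter (fun q =>
          |PySem.List.pyGetD q.2 1 0 - PySem.List.pyGetD v 1 0| < diff)).map (fun q => (k, q.1))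
        ++ pvPairsA diff rest

-- the body of A's merge loop over similar_pairs (state = (merged_dic, merged_keys))
def pvMergeStep (fd : PySem.Dict String (List Int)) :
    PySem.Dict String (List Int) × PySem.Set String → String × String →
    PySem.Dict String (List Int) × PySem.Set String :=
  fun st pr =>
    if PySem.Set.contains st.2 pr.1 || PySem.Set.contains st.2 pr.2 then st
    else
      (st.1.insert (PySem.Str.join "_" [pr.1, pr.2])
          (List.zipWith min ((fd.get? pr.1).getD []) ((fd.get? pr.2).getD [])),
       PySem.Set.update st.2 [pr.1, pr.2])

def handle_dict_values (dic : List (String × List Int)) (diff : Int) (tag : Int) : List (String × List Int) :=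
  let filtered := (PySem.Dict.ofList dic).items.filter
      (fun p => PySem.List.pyGet? p.2 (-1) == some tag)
  let fd : PySem.Dict String (List Int) := PySem.Dict.mk filtered
  let st := (pvPairsA diff filtered).foldl (pvMergeStep fd) (PySem.Dict.empty, PySem.Set.empty)
  let mergedDic := (filtered.filter (fun p => !(PySem.Set.contains st.2 p.1))).foldl
      (fun d (p : String × List Int) => d.insert p.1 p.2) st.1
  (PySem.Dict.ofList (PySem.List.sorted mergedDic.items
      (fun p => PySem.List.pyGetD p.2 0 0) false)).items

-- ===== PORT B =====
-- the inner scan: first later item whose key is unused and whose y-coordinate is close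
def pvScanB (diff : Int) (v1 : List Int) (used : PySem.Set String) :
    List (String × List Int) → Option (String × List Int)
  | [] => none
  | (k2, v2) :: rest =>
      if PySem.Set.contains used k2
          || !(|PySem.List.pyGetD v2 1 0 - PySem.List.pyGetD v1 1 0| < diff) then
        pvScanB diff v1 used rest
      else some (k2, v2)

-- the single forward pass: merge each unused item with its first close unused partner
def pvPassB (diff : Int) : List (String × List Int) → PySem.Dict String (List Int) →
    PySem.Set String → PySem.Dict String (List Int) × PySem.Set String
  | [], d, used => (d, used)
  | (k1, v1) :: rest, d, used =>
      if PySem.Set.contains used k1 then pvPassB diff rest d used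
      else
        match pvScanB diff v1 used rest with
        | none => pvPassB diff rest d used
        | some (k2, v2) =>
            pvPassB diff rest
              (d.insert (PySem.Str.join "_" [k1, k2]) (List.zipWith min v1 v2))
              ((used.add k1).add k2)

def handle_dict_values_alt (dic : List (String × List Int)) (diff : Int) (tag : Int) : List (String × List Int) :=
  let items := (PySem.Dict.ofList dic).items.filter
      (fun p => PySem.List.pyGet? p.2 (-1) == some tag)
  let st := pvPassB diff items PySem.Dict.empty PySem.Set.empty
  let merged := items.foldl
      (fun d (p : String × List Int) =>
        if PySem.Set.contains st.2 p.1 then d else d.insert p.1 p.2) st.1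
  (PySem.Dict.ofList (PySem.List.sorted merged.items
      (fun p => PySem.List.pyGetD p.2 0 0) false)).items

-- ===== PRECONDITION & SPEC =====
-- Pre_ excludes exactly the inputs on which A raises IndexError: an entry of the dict with an
-- empty value (value[-1]), or — when at least two entries carry the tag — a tagged value of
-- length < 2 (value[1] in the pair scan).
def Pre_handle_dict_values (dic : List (String × List Int)) (diff : Int) (tag : Int) : Prop :=
  (∀ p ∈ (PySem.Dict.ofList dic).items, p.2 ≠ []) ∧
  (2 ≤ ((PySem.Dict.ofList dic).items.filter
        (fun p => PySem.List.pyGet? p.2 (-1) == some tag)).length →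
    ∀ p ∈ (PySem.Dict.ofList dic).items,
      PySem.List.pyGet? p.2 (-1) = some tag → 2 ≤ p.2.length)
instance (dic : List (String × List Int)) (diff : Int) (tag : Int) : Decidable (Pre_handle_dict_values dic diff tag) := by unfold Pre_handle_dict_values; infer_instance

def pvWitness_handle_dict_values : (List (String × List Int)) × Int × Int :=
  ([("a", [1, 3, 2]), ("b", [4, 5, 2]), ("c", [0, 9, 7])], 5, 2)

def Spec_handle_dict_values (dic : List (String × List Int)) (diff : Int) (tag : Int) (out : List (String × List Int)) : Prop := out = handle_dict_values_alt dic diff tag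
instance (dic : List (String × List Int)) (diff : Int) (tag : Int) (out : List (String × List Int)) : Decidable (Spec_handle_dict_values dic diff tag out) := by unfold Spec_handle_dict_values; infer_instance

-- ===== CLAIM (what is proved, stated in full; the proofs are below) =====
def Claim_equal_handle_dict_values : Prop := ∀ (dic : List (String × List Int)) (diff : Int) (tag : Int), Dom_handle_dict_values dic diff tag → Pre_handle_dict_values dic diff tag → Spec_handle_dict_values dic diff tag (handle_dict_values dic diff tag)

-- ===== LEMMAS AND PROOFS =====

-- pairs that all start at an already-used key are all skipped
theorem pvSeg_skip (fd : PySem.Dict String (List Int)) (k : String)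
    (qs : List (String × List Int)) (d : PySem.Dict String (List Int)) (used : PySem.Set String)
    (hk : k ∈ used) :
    (qs.map (fun q => (k, q.1))).foldl (pvMergeStep fd) (d, used) = (d, used) := by
  induction qs with
  | nil => rfl
  | cons q rest ih => simp [pvMergeStep, hk, ih]

-- folding one i-segment of similar_pairs is exactly B's inner scan
theorem pvSeg_merge (fd : PySem.Dict String (List Int)) (diff : Int) (k : String) (v : List Int)
    (rest : List (String × List Int)) (d : PySem.Dict String (List Int)) (used : PySem.Set String)
    (hk : k ∉ used)
    (hv : fd.get? k = some v)
    (h : ∀ p ∈ rest, fd.get? p.1 = some p.2) :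
    ((rest.filter (fun q =>
        |PySem.List.pyGetD q.2 1 0 - PySem.List.pyGetD v 1 0| < diff)).map
          (fun q => (k, q.1))).foldl (pvMergeStep fd) (d, used)
    = match pvScanB diff v used rest with
      | none => (d, used)
      | some (k2, v2) =>
          (d.insert (PySem.Str.join "_" [k, k2]) (List.zipWith min v v2), (used.add k).add k2) := by
  induction rest with
  | nil => rfl
  | cons q rest' ih =>
      obtain ⟨k2, v2⟩ := q
      have hq : fd.get? k2 = some v2 := h (k2, v2) (by simp)
      have h' : ∀ p ∈ rest', fd.get? p.1 = some p.2 := fun p hp => h p (by simp [hp])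
      by_cases hc : |PySem.List.pyGetD v2 1 0 - PySem.List.pyGetD v 1 0| < diff
      · by_cases hu : k2 ∈ used
        · simp [pvScanB, hc, hu, pvMergeStep, hk, ih h']
        · have hstep :
              pvMergeStep fd (d, used) (k, k2)
                = (d.insert (PySem.Str.join "_" [k, k2]) (List.zipWith min v v2),
                    (used.add k).add k2) := by
            simp [pvMergeStep, hk, hu, hv, hq, PySem.Set.update]
          have hkin : k ∈ (used.add k).add k2 := by
            simp [PySem.Set.mem_add]
          rw [show pvScanB diff v used ((k2, v2) :: rest') = some (k2, v2) by
            simp [pvScanB, hc, hu]]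
          simp only [List.filter_cons, hc, decide_true, if_pos, List.map_cons, List.foldl_cons,
            hstep]
          exact pvSeg_skip fd k _ _ _ hkin
      · simp [pvScanB, hc, ih h']

-- the whole pair fold equals B's fused pass
theorem pvPass_eq (diff : Int) (fd : PySem.Dict String (List Int)) :
    ∀ (items : List (String × List Int)) (d : PySem.Dict String (List Int)) (used : PySem.Set String),
      (∀ p ∈ items, fd.get? p.1 = some p.2) →
      (pvPairsA diff items).foldl (pvMergeStep fd) (d, used) = pvPassB diff items d used := by
  intro items
  induction items with
  | nil => intro d used h; rfl
  | cons p rest ih =>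
      obtain ⟨k, v⟩ := p
      intro d used h
      have hv : fd.get? k = some v := h (k, v) (by simp)
      have h' : ∀ p ∈ rest, fd.get? p.1 = some p.2 := fun p hp => h p (by simp [hp])
      simp only [pvPairsA, List.foldl_append]
      by_cases hk : k ∈ used
      · rw [pvSeg_skip fd k _ _ _ hk, ih _ _ h']
        simp [pvPassB, hk]
      · rw [pvSeg_merge fd diff k v rest d used hk hv h']
        cases hscan : pvScanB diff v used rest with
        | none => rw [ih _ _ h']; simp [pvPassB, hk, hscan]
        | some q =>
            obtain ⟨k2, v2⟩ := q
            rw [ih _ _ h']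
            simp [pvPassB, hk, hscan]

-- guarded insert loop = filter then insert loop
theorem pvFold_if_insert (used : PySem.Set String) :
    ∀ (l : List (String × List Int)) (d : PySem.Dict String (List Int)),
      l.foldl (fun d (p : String × List Int) =>
          if p.1 ∈ used then d else d.insert p.1 p.2) d
      = (l.filter (fun p => !decide (p.1 ∈ used))).foldl
          (fun d (p : String × List Int) => d.insert p.1 p.2) d := by
  intro l
  induction l with
  | nil => intro d; rfl
  | cons p rest ih =>
      intro d
      by_cases hp : p.1 ∈ used <;> simp [hp, ih]

-- ===== VERDICT (by name: the statement is the Claim_ definition above) =====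
theorem handle_dict_values_spec : Claim_equal_handle_dict_values := by
  intro dic diff tag _ _
  show handle_dict_values dic diff tag = handle_dict_values_alt dic diff tag
  unfold handle_dict_values handle_dict_values_alt
  dsimp only
  set F := (PySem.Dict.ofList dic).items.filter
      (fun p => PySem.List.pyGet? p.2 (-1) == some tag) with hF
  have hnd : (F.map Prod.fst).Nodup := by
    have h1 : ((PySem.Dict.ofList dic).items.map Prod.fst).Nodup := by
      have h2 := PySem.Dict.nodup_keys_ofList (ps := dic)
      simpa [PySem.Dict.keys] using h2
    exact (List.Sublist.map Prod.fst (List.filter_sublist (l := (PySem.Dict.ofList dic).items) (p := fun p => PySem.List.pyGet? p.2 (-1) == some tag))).nodup h1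
  have hlook : ∀ p ∈ F, (PySem.Dict.mk F).get? p.1 = some p.2 := by
    intro p hp
    obtain ⟨a, b⟩ := p
    exact PySem.Dict.get?_of_mem_items (d := PySem.Dict.mk F) hp
      (by simpa [PySem.Dict.keys] using hnd)
  rw [pvPass_eq diff (PySem.Dict.mk F) F _ _ hlook]
  simp [pvFold_if_insert]
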